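-- pv_equiv track=rewrite | github.com/adanzl/leetcode-practice | py/q1700/Q1755.py | minAbsDifference
-- ===== SOURCE A (Python) =====
-- from typing import List
--
-- def minAbsDifference(nums: List[int], goal: int) -> int:
--     # n 的范围超过了30，不能直接使用二进制 dp，由于是40，可以考虑折半使用
--     # 问题转换为，答案在l_sum或者r_sum中或者l_sum、r_sum中各一个
--     n = len(nums)
--     l_sum, r_sum = [0], [0]
--     for i in range(n):
--         sm = l_sum if i < n // 2 else r_sum
--         for j in range(len(sm)):
--             sm.append(sm[j] + nums[i])
--     l_sum.sort()
--     r_sum.sort()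
--     ans = abs(goal)
--     for num in l_sum:  # 答案在 l_sum 中
--         ans = min(ans, abs(goal - num))
--     for num in r_sum:  # 答案在 r_sum 中
--         ans = min(ans, abs(goal - num))
--     # l_sum 和 r_sum 中各选一个，排序后双指针扫描
--     i1, i2 = 0, len(r_sum) - 1
--     while i1 < len(l_sum) and i2 >=0:
--         s = l_sum[i1] + r_sum[i2]
--         if s > goal:
--             i2 -= 1
--         else:
--             i1 += 1
--         ans = min(ans, abs(s-goal))
--     return ans
-- ===== SOURCE B (Python) =====
-- from typing import List
--
-- def _bisect_left(a: List[int], x: int) -> int: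
--     lo, hi = 0, len(a)
--     while lo < hi:
--         mid = (lo + hi) // 2
--         if a[mid] < x:
--             lo = mid + 1
--         else:
--             hi = mid
--     return lo
--
-- def minAbsDifference(nums: List[int], goal: int) -> int:
--     n = len(nums)
--     l_sum, r_sum = [0], [0]
--     for i in range(n):
--         sm = l_sum if i < n // 2 else r_sum
--         for j in range(len(sm)):
--             sm.append(sm[j] + nums[i])
--     r_sum.sort()
--     ans = abs(goal)
--     for l in l_sum:
--         t = goal - l
--         idx = _bisect_left(r_sum, t)
--         if idx < len(r_sum):
--             ans = min(ans, abs(t - r_sum[idx]))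
--         if idx > 0:
--             ans = min(ans, abs(t - r_sum[idx - 1]))
--     return ans
-- ===== Notes on version B (the rewrite author's own statement) =====
-- stated objective: alternative
-- what changed: B keeps A's meet-in-the-middle subset-sum generation but replaces A's two single-half scans and sorted two-pointer sweep with one hand-written binary search (bisect_left) per left-half sum over the sorted right-half sums, checking the two neighbouring candidates; l_sum is no longer sorted.
import Mathlib
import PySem

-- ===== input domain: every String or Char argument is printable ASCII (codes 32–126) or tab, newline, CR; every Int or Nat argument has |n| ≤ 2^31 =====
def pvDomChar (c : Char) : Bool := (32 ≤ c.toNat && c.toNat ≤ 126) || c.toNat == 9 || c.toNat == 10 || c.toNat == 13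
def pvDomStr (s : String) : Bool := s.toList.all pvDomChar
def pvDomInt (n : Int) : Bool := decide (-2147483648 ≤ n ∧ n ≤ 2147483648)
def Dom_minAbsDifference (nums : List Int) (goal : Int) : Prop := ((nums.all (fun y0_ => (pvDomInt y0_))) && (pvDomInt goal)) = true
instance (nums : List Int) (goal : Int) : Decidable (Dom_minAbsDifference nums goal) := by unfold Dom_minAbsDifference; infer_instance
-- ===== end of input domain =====

-- B replaces A's two single-half scans and two-pointer sweep with one binary search (hand-written
-- bisect_left) per left-half sum over the sorted right-half sums; equal return value, alternative algorithm.
-- The half subset-sum generation loop is textually identical in both sources and is transliterated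
-- once (pvGenInner/pvBuildHalves) and used by both ports.

-- ===== PORT A =====
-- inner loop: for j in range(len(sm)): sm.append(sm[j] + nums[i])
def pvGenInner (x : Int) (sm : List Int) : List Int :=
  (PySem.List.pyRange 0 (sm.length : Int) 1).foldl
    (fun acc j => acc ++ [PySem.List.pyGetD acc j 0 + x]) sm

-- outer loop building (l_sum, r_sum)
def pvBuildHalves (nums : List Int) : List Int × List Int :=
  (PySem.List.pyRange 0 (nums.length : Int) 1).foldl
    (fun p i =>
      if i < PySem.Int.floordiv (nums.length : Int) 2 then
        (pvGenInner (PySem.List.pyGetD nums i 0) p.1, p.2)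
      else
        (p.1, pvGenInner (PySem.List.pyGetD nums i 0) p.2))
    ([0], [0])

-- the while loop with pointers i1 (left, ascending) and i2 (right, descending)
def pvTwoPtr (L R : List Int) (goal : Int) (i1 : Nat) (i2 : Int) (ans : Int) : Int :=
  if _h : i1 < L.length ∧ 0 ≤ i2 then
    let s := PySem.List.pyGetD L (i1 : Int) 0 + PySem.List.pyGetD R i2 0
    if s > goal then pvTwoPtr L R goal i1 (i2 - 1) (min ans |s - goal|)
    else pvTwoPtr L R goal (i1 + 1) i2 (min ans |s - goal|)
  else ans
termination_by (L.length - i1) + (i2 + 1).toNat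
decreasing_by all_goals omega

def minAbsDifference (nums : List Int) (goal : Int) : Int :=
  let lr := pvBuildHalves nums
  let lSum := PySem.List.sorted lr.1 (fun x => x)
  let rSum := PySem.List.sorted lr.2 (fun x => x)
  let ans0 := |goal|
  let ans1 := lSum.foldl (fun a num => min a |goal - num|) ans0
  let ans2 := rSum.foldl (fun a num => min a |goal - num|) ans1
  pvTwoPtr lSum rSum goal 0 ((rSum.length : Int) - 1) ans2

-- ===== PORT B =====
-- hand-written bisect_left (Source B's _bisect_left): lo, hi = 0, len(a); while lo < hi: ...
def pvBisectLeft (a : List Int) (x : Int) (lo hi : Nat) : Nat :=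
  if _h : lo < hi then
    let mid := (lo + hi) / 2
    if PySem.List.pyGetD a (mid : Int) 0 < x then pvBisectLeft a x (mid + 1) hi
    else pvBisectLeft a x lo mid
  else lo
termination_by hi - lo
decreasing_by all_goals omega

def minAbsDifference_alt (nums : List Int) (goal : Int) : Int :=
  let lr := pvBuildHalves nums
  let rSum := PySem.List.sorted lr.2 (fun x => x)
  lr.1.foldl
    (fun ans l =>
      let t := goal - l
      let idx := pvBisectLeft rSum t 0 rSum.length
      let ans1 := if idx < rSum.length then min ans |t - PySem.List.pyGetD rSum (idx : Int) 0| else ans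
      if 0 < idx then min ans1 |t - PySem.List.pyGetD rSum ((idx : Int) - 1) 0| else ans1)
    |goal|

-- ===== PRECONDITION & SPEC =====
def Spec_minAbsDifference (nums : List Int) (goal : Int) (out : Int) : Prop := out = minAbsDifference_alt nums goal
instance (nums : List Int) (goal : Int) (out : Int) : Decidable (Spec_minAbsDifference nums goal out) := by unfold Spec_minAbsDifference; infer_instance

-- ===== CLAIM (what is proved, stated in full; the proofs are below) =====
def Claim_equal_minAbsDifference : Prop := ∀ (nums : List Int) (goal : Int), Dom_minAbsDifference nums goal → Spec_minAbsDifference nums goal (minAbsDifference nums goal)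

-- ===== LEMMAS AND PROOFS =====

-- v is one of the values both programs take minima over: |goal| or |goal - (l + r)| for a pair of half sums
def pvCand (nums : List Int) (goal v : Int) : Prop :=
  v = |goal| ∨ ∃ l ∈ (pvBuildHalves nums).1, ∃ r ∈ (pvBuildHalves nums).2, v = |goal - (l + r)|

-- v is a lower bound of all those values
def pvLB (nums : List Int) (goal v : Int) : Prop :=
  v ≤ |goal| ∧ ∀ l ∈ (pvBuildHalves nums).1, ∀ r ∈ (pvBuildHalves nums).2, v ≤ |goal - (l + r)|

lemma pvFoldl_extends (g : List Int → Int → Int) :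
    ∀ (js : List Int) (acc : List Int), acc <+: js.foldl (fun a j => a ++ [g a j]) acc := by
  intro js
  induction js with
  | nil => intro acc; simp
  | cons j t ih =>
    intro acc
    simp only [List.foldl_cons]
    exact (List.prefix_append acc _).trans (ih _)

lemma pvGenInner_mem (x : Int) (sm : List Int) (v : Int) (hv : v ∈ sm) : v ∈ pvGenInner x sm := by
  exact (pvFoldl_extends (fun a j => PySem.List.pyGetD a j 0 + x) _ sm).subset hv

lemma pvBuildHalves_zero (nums : List Int) :
    0 ∈ (pvBuildHalves nums).1 ∧ 0 ∈ (pvBuildHalves nums).2 := by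
  unfold pvBuildHalves
  generalize PySem.List.pyRange 0 (nums.length : Int) 1 = is
  have H : ∀ (is : List Int) (p : List Int × List Int), 0 ∈ p.1 → 0 ∈ p.2 →
      0 ∈ (is.foldl (fun p i =>
        if i < PySem.Int.floordiv (nums.length : Int) 2 then
          (pvGenInner (PySem.List.pyGetD nums i 0) p.1, p.2)
        else
          (p.1, pvGenInner (PySem.List.pyGetD nums i 0) p.2)) p).1 ∧
      0 ∈ (is.foldl (fun p i =>
        if i < PySem.Int.floordiv (nums.length : Int) 2 then
          (pvGenInner (PySem.List.pyGetD nums i 0) p.1, p.2)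
        else
          (p.1, pvGenInner (PySem.List.pyGetD nums i 0) p.2)) p).2 := by
    intro is
    induction is with
    | nil => intro p h1 h2; exact ⟨h1, h2⟩
    | cons i t ih =>
      intro p h1 h2
      simp only [List.foldl_cons]
      split
      · exact ih _ (pvGenInner_mem _ _ _ h1) h2
      · exact ih _ h1 (pvGenInner_mem _ _ _ h2)
  exact H is ([0], [0]) (by simp) (by simp)

lemma pvFoldl_le_init {α : Type} (g : Int → α → Int) (hg : ∀ a x, g a x ≤ a) :
    ∀ (xs : List α) (a : Int), xs.foldl g a ≤ a := by
  intro xs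
  induction xs with
  | nil => intro a; simp
  | cons x t ih => intro a; exact le_trans (ih (g a x)) (hg a x)

lemma pvFoldl_cand {α : Type} (g : Int → α → Int) (C : α → Int → Prop)
    (hg : ∀ a x, g a x = a ∨ C x (g a x)) :
    ∀ (xs : List α) (a : Int), xs.foldl g a = a ∨ ∃ x ∈ xs, C x (xs.foldl g a) := by
  intro xs
  induction xs with
  | nil => intro a; left; rfl
  | cons x t ih =>
    intro a
    simp only [List.foldl_cons]
    rcases ih (g a x) with h | ⟨y, hy, hC⟩
    · rcases hg a x with h2 | h2
      · left; rw [h, h2]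
      · right; exact ⟨x, List.mem_cons_self .., by rw [h]; exact h2⟩
    · right; exact ⟨y, List.mem_cons_of_mem _ hy, hC⟩

lemma pvFoldl_le_of_step {α : Type} (g : Int → α → Int) (hdec : ∀ a x, g a x ≤ a)
    (P : α → Int → Prop) (hstep : ∀ a x y, P x y → g a x ≤ y) :
    ∀ (xs : List α) (a : Int) (x : α), x ∈ xs → ∀ y, P x y → xs.foldl g a ≤ y := by
  intro xs
  induction xs with
  | nil => intro a x hx; cases hx
  | cons z t ih =>
    intro a x hx y hP
    simp only [List.foldl_cons]
    rcases List.mem_cons.mp hx with rfl | hx'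
    · exact le_trans (pvFoldl_le_init g hdec t (g a x)) (hstep a x y hP)
    · exact ih (g a z) x hx' y hP









lemma pvBisectLeft_eq_lt {a : List Int} {x : Int} {lo hi : Nat} (hlt : lo < hi)
    (hc : PySem.List.pyGetD a (((lo + hi) / 2 : Nat) : Int) 0 < x) :
    pvBisectLeft a x lo hi = pvBisectLeft a x ((lo + hi) / 2 + 1) hi := by
  rw [pvBisectLeft, dif_pos hlt]; exact if_pos hc

lemma pvBisectLeft_eq_ge {a : List Int} {x : Int} {lo hi : Nat} (hlt : lo < hi)
    (hc : ¬ PySem.List.pyGetD a (((lo + hi) / 2 : Nat) : Int) 0 < x) :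
    pvBisectLeft a x lo hi = pvBisectLeft a x lo ((lo + hi) / 2) := by
  rw [pvBisectLeft, dif_pos hlt]; exact if_neg hc

lemma pvBisectLeft_spec (a : List Int) (x : Int)
    (hmono : ∀ (p q : Nat) (hpq : p ≤ q) (hq : q < a.length), a[p]'(lt_of_le_of_lt hpq hq) ≤ a[q]) :
    ∀ (lo hi : Nat), lo ≤ hi → hi ≤ a.length →
      (∀ j (hj : j < a.length), j < lo → a[j] < x) →
      (∀ j (hj : j < a.length), hi ≤ j → x ≤ a[j]) →
      (lo ≤ pvBisectLeft a x lo hi ∧ pvBisectLeft a x lo hi ≤ hi) ∧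
      (∀ j (hj : j < a.length), j < pvBisectLeft a x lo hi → a[j] < x) ∧
      (∀ j (hj : j < a.length), pvBisectLeft a x lo hi ≤ j → x ≤ a[j]) := by
  intro lo hi
  induction lo, hi using pvBisectLeft.induct a x with
  | case1 lo hi hlt mid hmid ih =>
    intro hlohi hhi hlow hhigh
    have hm : mid = (lo + hi) / 2 := rfl
    have hmlt : mid < a.length := by omega
    have hget : PySem.List.pyGetD a (mid : Int) 0 = a[mid]'hmlt := by
      rw [PySem.List.pyGetD_eq_getElem a 0 (by positivity) (by exact_mod_cast hmlt)]
      simp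
    rw [pvBisectLeft_eq_lt hlt (hm ▸ (hget ▸ hmid)), ← hm]
    rw [hget] at hmid
    obtain ⟨⟨b1, b2⟩, hL, hH⟩ := ih (by omega) hhi
      (fun j hj hjm => lt_of_le_of_lt (hmono j mid (by omega) hmlt) hmid) hhigh
    exact ⟨⟨by omega, b2⟩, hL, hH⟩
  | case2 lo hi hlt mid hmid ih =>
    intro hlohi hhi hlow hhigh
    have hm : mid = (lo + hi) / 2 := rfl
    have hmlt : mid < a.length := by omega
    have hget : PySem.List.pyGetD a (mid : Int) 0 = a[mid]'hmlt := by
      rw [PySem.List.pyGetD_eq_getElem a 0 (by positivity) (by exact_mod_cast hmlt)]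
      simp
    rw [pvBisectLeft_eq_ge hlt (hm ▸ (hget ▸ hmid)), ← hm]
    rw [hget] at hmid
    rw [not_lt] at hmid
    obtain ⟨⟨b1, b2⟩, hL, hH⟩ := ih (by omega) (by omega) hlow
      (fun j hj hjm => le_trans hmid (hmono mid j hjm hj))
    exact ⟨⟨b1, by omega⟩, hL, hH⟩
  | case3 lo hi hlt =>
    intro hlohi hhi hlow hhigh
    rw [pvBisectLeft, dif_neg hlt]
    exact ⟨⟨le_rfl, hlohi⟩, hlow, fun j hj hjm => hhigh j hj (by omega)⟩

lemma pvTwoPtr_eq_stop {L R : List Int} {goal : Int} {i1 : Nat} {i2 ans : Int}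
    (h : ¬(i1 < L.length ∧ 0 ≤ i2)) : pvTwoPtr L R goal i1 i2 ans = ans := by
  rw [pvTwoPtr, dif_neg h]

lemma pvTwoPtr_eq_gt {L R : List Int} {goal : Int} {i1 : Nat} {i2 ans : Int}
    (h : i1 < L.length ∧ 0 ≤ i2)
    (hc : PySem.List.pyGetD L (i1 : Int) 0 + PySem.List.pyGetD R i2 0 > goal) :
    pvTwoPtr L R goal i1 i2 ans =
      pvTwoPtr L R goal i1 (i2 - 1)
        (min ans |PySem.List.pyGetD L (i1 : Int) 0 + PySem.List.pyGetD R i2 0 - goal|) := by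
  rw [pvTwoPtr, dif_pos h]; exact if_pos hc

lemma pvTwoPtr_eq_le {L R : List Int} {goal : Int} {i1 : Nat} {i2 ans : Int}
    (h : i1 < L.length ∧ 0 ≤ i2)
    (hc : ¬ PySem.List.pyGetD L (i1 : Int) 0 + PySem.List.pyGetD R i2 0 > goal) :
    pvTwoPtr L R goal i1 i2 ans =
      pvTwoPtr L R goal (i1 + 1) i2
        (min ans |PySem.List.pyGetD L (i1 : Int) 0 + PySem.List.pyGetD R i2 0 - goal|) := by
  rw [pvTwoPtr, dif_pos h]; exact if_neg hc

lemma pvTwoPtr_le_ans (L R : List Int) (goal : Int) :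
    ∀ (i1 : Nat) (i2 ans : Int), pvTwoPtr L R goal i1 i2 ans ≤ ans := by
  intro i1 i2 ans
  induction i1, i2, ans using pvTwoPtr.induct L R goal with
  | case1 i1 i2 ans h s hgt ih =>
    rw [pvTwoPtr_eq_gt h hgt]
    exact le_trans ih (min_le_left _ _)
  | case2 i1 i2 ans h s hle ih =>
    rw [pvTwoPtr_eq_le h hle]
    exact le_trans ih (min_le_left _ _)
  | case3 i1 i2 ans h => rw [pvTwoPtr_eq_stop h]

lemma pvTwoPtr_cand (L R : List Int) (goal : Int) :
    ∀ (i1 : Nat) (i2 ans : Int), i2 < (R.length : Int) →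
      pvTwoPtr L R goal i1 i2 ans = ans ∨
      ∃ l ∈ L, ∃ r ∈ R, pvTwoPtr L R goal i1 i2 ans = |goal - (l + r)| := by
  intro i1 i2 ans
  induction i1, i2, ans using pvTwoPtr.induct L R goal with
  | case1 i1 i2 ans h s hgt ih =>
    intro hi2
    rw [pvTwoPtr_eq_gt h hgt]
    have hL : PySem.List.pyGetD L (i1 : Int) 0 = L[i1]'h.1 := by
      rw [PySem.List.pyGetD_eq_getElem L 0 (by positivity) (by exact_mod_cast h.1)]; simp
    have hi2n : i2.toNat < R.length := by omega
    have hR : PySem.List.pyGetD R i2 0 = R[i2.toNat]'hi2n := by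
      rw [PySem.List.pyGetD_eq_getElem R 0 h.2 (by omega)]
    rcases ih (by omega) with heq | hc
    · rw [heq]
      rcases min_cases ans |PySem.List.pyGetD L (i1 : Int) 0 + PySem.List.pyGetD R i2 0 - goal| with
        ⟨hm, _⟩ | ⟨hm, _⟩
      · left; exact hm
      · right
        refine ⟨L[i1]'h.1, List.getElem_mem _, R[i2.toNat]'hi2n, List.getElem_mem _, ?_⟩
        rw [hm, hL, hR, abs_sub_comm]
    · right; exact hc
  | case2 i1 i2 ans h s hle ih =>
    intro hi2
    rw [pvTwoPtr_eq_le h hle]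
    have hL : PySem.List.pyGetD L (i1 : Int) 0 = L[i1]'h.1 := by
      rw [PySem.List.pyGetD_eq_getElem L 0 (by positivity) (by exact_mod_cast h.1)]; simp
    have hi2n : i2.toNat < R.length := by omega
    have hR : PySem.List.pyGetD R i2 0 = R[i2.toNat]'hi2n := by
      rw [PySem.List.pyGetD_eq_getElem R 0 h.2 (by omega)]
    rcases ih hi2 with heq | hc
    · rw [heq]
      rcases min_cases ans |PySem.List.pyGetD L (i1 : Int) 0 + PySem.List.pyGetD R i2 0 - goal| with
        ⟨hm, _⟩ | ⟨hm, _⟩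
      · left; exact hm
      · right
        refine ⟨L[i1]'h.1, List.getElem_mem _, R[i2.toNat]'hi2n, List.getElem_mem _, ?_⟩
        rw [hm, hL, hR, abs_sub_comm]
    · right; exact hc
  | case3 i1 i2 ans h => intro _; left; exact pvTwoPtr_eq_stop h

lemma pvTwoPtr_lb (L R : List Int) (goal : Int)
    (hL : ∀ (p q : Nat) (hpq : p ≤ q) (hq : q < L.length), L[p]'(lt_of_le_of_lt hpq hq) ≤ L[q])
    (hR : ∀ (p q : Nat) (hpq : p ≤ q) (hq : q < R.length), R[p]'(lt_of_le_of_lt hpq hq) ≤ R[q]) :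
    ∀ (i1 : Nat) (i2 ans : Int), i2 < (R.length : Int) →
      ∀ (a b : Nat) (ha : a < L.length) (hb : b < R.length),
        i1 ≤ a → (b : Int) ≤ i2 → pvTwoPtr L R goal i1 i2 ans ≤ |goal - (L[a] + R[b])| := by
  intro i1 i2 ans
  induction i1, i2, ans using pvTwoPtr.induct L R goal with
  | case1 i1 i2 ans h s hgt ih =>
    intro hi2 a b ha hb hia hbi
    have hgetL : PySem.List.pyGetD L (i1 : Int) 0 = L[i1]'h.1 := by
      rw [PySem.List.pyGetD_eq_getElem L 0 (by positivity) (by exact_mod_cast h.1)]; simp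
    have hi2n : i2.toNat < R.length := by omega
    have hgetR : PySem.List.pyGetD R i2 0 = R[i2.toNat]'hi2n := by
      rw [PySem.List.pyGetD_eq_getElem R 0 h.2 (by omega)]
    rw [pvTwoPtr_eq_gt h hgt]
    by_cases hb2 : (b : Int) ≤ i2 - 1
    · exact ih (by omega) a b ha hb hia hb2
    · -- b = i2.toNat : bound via the current step's min
      have hbeq : b = i2.toNat := by omega
      have h1 : pvTwoPtr L R goal i1 (i2 - 1)
          (min ans |PySem.List.pyGetD L (i1 : Int) 0 + PySem.List.pyGetD R i2 0 - goal|) ≤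
          |PySem.List.pyGetD L (i1 : Int) 0 + PySem.List.pyGetD R i2 0 - goal| :=
        le_trans (pvTwoPtr_le_ans L R goal _ _ _) (min_le_right _ _)
      rw [hgetL, hgetR] at h1
      have hgt' : L[i1]'h.1 + R[i2.toNat]'hi2n > goal := by rw [← hgetL, ← hgetR]; exact hgt
      have hLa : L[i1]'h.1 ≤ L[a] := hL i1 a hia ha
      have hRb : R[i2.toNat]'hi2n = R[b] := by congr 1; omega
      rw [hRb] at h1 hgt'
      have habs1 : |L[i1]'h.1 + R[b] - goal| = L[i1]'h.1 + R[b] - goal := abs_of_pos (by omega)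
      have habs2 : |goal - (L[a] + R[b])| = L[a] + R[b] - goal := by
        rw [abs_sub_comm]; exact abs_of_pos (by omega)
      rw [hgetL, hgetR, hRb]
      omega
  | case2 i1 i2 ans h s hle ih =>
    intro hi2 a b ha hb hia hbi
    have hgetL : PySem.List.pyGetD L (i1 : Int) 0 = L[i1]'h.1 := by
      rw [PySem.List.pyGetD_eq_getElem L 0 (by positivity) (by exact_mod_cast h.1)]; simp
    have hi2n : i2.toNat < R.length := by omega
    have hgetR : PySem.List.pyGetD R i2 0 = R[i2.toNat]'hi2n := by
      rw [PySem.List.pyGetD_eq_getElem R 0 h.2 (by omega)]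
    rw [pvTwoPtr_eq_le h hle]
    by_cases ha2 : i1 + 1 ≤ a
    · exact ih hi2 a b ha hb ha2 hbi
    · have haeq : a = i1 := by omega
      have h1 : pvTwoPtr L R goal (i1 + 1) i2
          (min ans |PySem.List.pyGetD L (i1 : Int) 0 + PySem.List.pyGetD R i2 0 - goal|) ≤
          |PySem.List.pyGetD L (i1 : Int) 0 + PySem.List.pyGetD R i2 0 - goal| :=
        le_trans (pvTwoPtr_le_ans L R goal _ _ _) (min_le_right _ _)
      rw [hgetL, hgetR] at h1
      have hle' : ¬ L[i1]'h.1 + R[i2.toNat]'hi2n > goal := by rw [← hgetL, ← hgetR]; exact hle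
      have hRb : R[b] ≤ R[i2.toNat]'hi2n := hR b i2.toNat (by omega) hi2n
      have hLa : L[a] = L[i1]'h.1 := by congr 1
      have habs1 : |L[i1]'h.1 + R[i2.toNat]'hi2n - goal| = goal - (L[i1]'h.1 + R[i2.toNat]'hi2n) := by
        rw [abs_sub_comm]; exact abs_of_nonneg (by omega)
      have habs2 : |goal - (L[a] + R[b])| = goal - (L[a] + R[b]) := abs_of_nonneg (by omega)
      rw [hgetL, hgetR]
      omega
  | case3 i1 i2 ans h =>
    intro hi2 a b ha hb hia hbi
    exact absurd (by constructor <;> omega : i1 < L.length ∧ 0 ≤ i2) h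


-- proof-only name for B's loop body (definitionally the lambda in minAbsDifference_alt)
def pvBStep (R : List Int) (goal : Int) (ans l : Int) : Int :=
  let t := goal - l
  let idx := pvBisectLeft R t 0 R.length
  let ans1 := if idx < R.length then min ans |t - PySem.List.pyGetD R (idx : Int) 0| else ans
  if 0 < idx then min ans1 |t - PySem.List.pyGetD R ((idx : Int) - 1) 0| else ans1

lemma pvBStep_le (R : List Int) (goal ans l : Int) : pvBStep R goal ans l ≤ ans := by
  simp only [pvBStep]
  split_ifs <;> omega

lemma pvBStep_cand (R : List Int) (goal : Int)
    (hmono : ∀ (p q : Nat) (hpq : p ≤ q) (hq : q < R.length), R[p]'(lt_of_le_of_lt hpq hq) ≤ R[q])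
    (ans l : Int) :
    pvBStep R goal ans l = ans ∨ ∃ r ∈ R, pvBStep R goal ans l = |goal - (l + r)| := by
  obtain ⟨⟨hb1, hb2⟩, _, _⟩ :=
    pvBisectLeft_spec R (goal - l) hmono 0 R.length (Nat.zero_le _) le_rfl
      (fun j hj hc => absurd hc (by omega)) (fun j hj hc => absurd hc (by omega))
  simp only [pvBStep]
  set idx := pvBisectLeft R (goal - l) 0 R.length with hidx
  by_cases h1 : idx < R.length
  · have hg1 : PySem.List.pyGetD R (idx : Int) 0 = R[idx]'h1 := by
      rw [PySem.List.pyGetD_eq_getElem R 0 (by positivity) (by exact_mod_cast h1)]; simp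
    by_cases h2 : 0 < idx
    · have hp : idx - 1 < R.length := by omega
      have hg2 : PySem.List.pyGetD R ((idx : Int) - 1) 0 = R[idx - 1]'hp := by
        rw [show ((idx : Int) - 1) = ((idx - 1 : Nat) : Int) by omega]
        rw [PySem.List.pyGetD_eq_getElem R 0 (by positivity) (by exact_mod_cast hp)]; simp
      rw [if_pos h1, if_pos h2]
      rcases min_cases (min ans |goal - l - PySem.List.pyGetD R (idx : Int) 0|)
          |goal - l - PySem.List.pyGetD R ((idx : Int) - 1) 0| with ⟨hm, _⟩ | ⟨hm, _⟩
      · rw [hm]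
        rcases min_cases ans |goal - l - PySem.List.pyGetD R (idx : Int) 0| with ⟨hm2, _⟩ | ⟨hm2, _⟩
        · left; exact hm2
        · right; exact ⟨R[idx]'h1, List.getElem_mem _, by rw [hm2, hg1, sub_sub]⟩
      · right; exact ⟨R[idx - 1]'hp, List.getElem_mem _, by rw [hm, hg2, sub_sub]⟩
    · rw [if_pos h1, if_neg h2]
      rcases min_cases ans |goal - l - PySem.List.pyGetD R (idx : Int) 0| with ⟨hm2, _⟩ | ⟨hm2, _⟩
      · left; exact hm2
      · right; exact ⟨R[idx]'h1, List.getElem_mem _, by rw [hm2, hg1, sub_sub]⟩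
  · by_cases h2 : 0 < idx
    · have hp : idx - 1 < R.length := by omega
      have hg2 : PySem.List.pyGetD R ((idx : Int) - 1) 0 = R[idx - 1]'hp := by
        rw [show ((idx : Int) - 1) = ((idx - 1 : Nat) : Int) by omega]
        rw [PySem.List.pyGetD_eq_getElem R 0 (by positivity) (by exact_mod_cast hp)]; simp
      rw [if_neg h1, if_pos h2]
      rcases min_cases ans |goal - l - PySem.List.pyGetD R ((idx : Int) - 1) 0| with ⟨hm, _⟩ | ⟨hm, _⟩
      · left; exact hm
      · right; exact ⟨R[idx - 1]'hp, List.getElem_mem _, by rw [hm, hg2, sub_sub]⟩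
    · rw [if_neg h1, if_neg h2]; left; rfl

lemma pvBStep_bound (R : List Int) (goal : Int)
    (hmono : ∀ (p q : Nat) (hpq : p ≤ q) (hq : q < R.length), R[p]'(lt_of_le_of_lt hpq hq) ≤ R[q])
    (ans l : Int) (b : Nat) (hb : b < R.length) :
    pvBStep R goal ans l ≤ |goal - (l + R[b])| := by
  obtain ⟨⟨hb1, hb2⟩, hlow, hhigh⟩ :=
    pvBisectLeft_spec R (goal - l) hmono 0 R.length (Nat.zero_le _) le_rfl
      (fun j hj hc => absurd hc (by omega)) (fun j hj hc => absurd hc (by omega))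
  simp only [pvBStep]
  set idx := pvBisectLeft R (goal - l) 0 R.length with hidx
  by_cases hcase : idx ≤ b
  · -- the candidate at idx is at least as close
    have h1 : idx < R.length := by omega
    have hg1 : PySem.List.pyGetD R (idx : Int) 0 = R[idx]'h1 := by
      rw [PySem.List.pyGetD_eq_getElem R 0 (by positivity) (by exact_mod_cast h1)]; simp
    have ht1 : goal - l ≤ R[idx]'h1 := hhigh idx h1 le_rfl
    have ht2 : R[idx]'h1 ≤ R[b] := hmono idx b hcase hb
    have habs1 : |goal - l - R[idx]'h1| = R[idx]'h1 - (goal - l) := by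
      rw [abs_sub_comm]; exact abs_of_nonneg (by linarith)
    have habs2 : |goal - (l + R[b])| = R[b] - (goal - l) := by
      rw [abs_sub_comm, show l + R[b] - goal = R[b] - (goal - l) from by ring]
      exact abs_of_nonneg (by linarith)
    have hX : |goal - l - R[idx]'h1| ≤ |goal - (l + R[b])| := by
      rw [habs1, habs2]; exact sub_le_sub_right ht2 _
    rw [if_pos h1, hg1]
    split_ifs
    · exact ((min_le_left _ _).trans (min_le_right _ _)).trans hX
    · exact (min_le_right _ _).trans hX
  · -- b < idx : the candidate at idx - 1 is at least as close
    have h2 : 0 < idx := by omega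
    have hp : idx - 1 < R.length := by omega
    have hg2 : PySem.List.pyGetD R ((idx : Int) - 1) 0 = R[idx - 1]'hp := by
      rw [show ((idx : Int) - 1) = ((idx - 1 : Nat) : Int) by omega]
      rw [PySem.List.pyGetD_eq_getElem R 0 (by positivity) (by exact_mod_cast hp)]; simp
    have ht1 : R[idx - 1]'hp < goal - l := hlow (idx - 1) hp (by omega)
    have ht2 : R[b] ≤ R[idx - 1]'hp := hmono b (idx - 1) (by omega) hp
    have habs1 : |goal - l - R[idx - 1]'hp| = (goal - l) - R[idx - 1]'hp :=
      abs_of_nonneg (by linarith)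
    have habs2 : |goal - (l + R[b])| = (goal - l) - R[b] := by
      rw [show goal - (l + R[b]) = goal - l - R[b] from by ring]
      exact abs_of_nonneg (by linarith)
    have hY : |goal - l - R[idx - 1]'hp| ≤ |goal - (l + R[b])| := by
      rw [habs1, habs2]; exact sub_le_sub_left ht2 _
    rw [if_pos h2, hg2]
    exact (min_le_right _ _).trans hY

lemma pvMinStep (goal : Int) : ∀ (a x : Int),
    (fun a num => min a |goal - num|) a x = a ∨
    (fun num v => v = |goal - num|) x ((fun a num => min a |goal - num|) a x) := by
  intro a x
  rcases min_cases a |goal - x| with ⟨h, _⟩ | ⟨h, _⟩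
  · left; exact h
  · right; exact h

lemma pvA_cand (nums : List Int) (goal : Int) : pvCand nums goal (minAbsDifference nums goal) := by
  obtain ⟨h01, h02⟩ := pvBuildHalves_zero nums
  unfold pvCand
  simp only [minAbsDifference]
  set Ls := PySem.List.sorted (pvBuildHalves nums).1 (fun x => x) with hLs
  set Rs := PySem.List.sorted (pvBuildHalves nums).2 (fun x => x) with hRs
  set ans1 := Ls.foldl (fun a num => min a |goal - num|) |goal| with ha1
  set ans2 := Rs.foldl (fun a num => min a |goal - num|) ans1 with ha2
  have hi2 : ((Rs.length : Int) - 1) < (Rs.length : Int) := by omega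
  rcases pvTwoPtr_cand Ls Rs goal 0 ((Rs.length : Int) - 1) ans2 hi2 with
    heq | ⟨l, hl, r, hr, heq⟩
  · rw [heq, ha2]
    rcases pvFoldl_cand (fun a num => min a |goal - num|) (fun num v => v = |goal - num|)
        (pvMinStep goal) Rs ans1 with h2 | ⟨r, hr, hC⟩
    · rw [h2, ha1]
      rcases pvFoldl_cand (fun a num => min a |goal - num|) (fun num v => v = |goal - num|)
          (pvMinStep goal) Ls |goal| with h3 | ⟨l, hl, hC⟩
      · left; exact h3
      · right
        refine ⟨l, (PySem.List.mem_sorted _ _ _ _).mp (hLs ▸ hl), 0, h02, ?_⟩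
        rw [hC, add_zero]
    · right
      refine ⟨0, h01, r, (PySem.List.mem_sorted _ _ _ _).mp (hRs ▸ hr), ?_⟩
      rw [hC, zero_add]
  · right
    exact ⟨l, (PySem.List.mem_sorted _ _ _ _).mp (hLs ▸ hl),
      r, (PySem.List.mem_sorted _ _ _ _).mp (hRs ▸ hr), heq⟩

lemma pvA_lb (nums : List Int) (goal : Int) : pvLB nums goal (minAbsDifference nums goal) := by
  obtain ⟨h01, h02⟩ := pvBuildHalves_zero nums
  unfold pvLB
  simp only [minAbsDifference]
  have hdec : ∀ (a x : Int), (fun a num => min a |goal - num|) a x ≤ a := by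
    intro a x; exact min_le_left _ _
  constructor
  · exact le_trans (pvTwoPtr_le_ans _ _ _ _ _ _)
      (le_trans (pvFoldl_le_init _ hdec _ _) (pvFoldl_le_init _ hdec _ _))
  · intro l hl r hr
    obtain ⟨a, ha, hae⟩ := List.mem_iff_getElem.mp
      ((PySem.List.mem_sorted (pvBuildHalves nums).1 (fun x => x) false l).mpr hl)
    obtain ⟨b, hb, hbe⟩ := List.mem_iff_getElem.mp
      ((PySem.List.mem_sorted (pvBuildHalves nums).2 (fun x => x) false r).mpr hr)
    have hi2 : ((PySem.List.sorted (pvBuildHalves nums).2 (fun x => x)).length : Int) - 1 <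
        ((PySem.List.sorted (pvBuildHalves nums).2 (fun x => x)).length : Int) := by omega
    rw [← hae, ← hbe]
    exact pvTwoPtr_lb _ _ goal
      (fun p q hpq hq => PySem.List.sorted_id_getElem_mono (pvBuildHalves nums).1 hpq hq)
      (fun p q hpq hq => PySem.List.sorted_id_getElem_mono (pvBuildHalves nums).2 hpq hq)
      0 _ _ hi2 a b ha hb (Nat.zero_le a) (by omega)

lemma pvB_cand (nums : List Int) (goal : Int) : pvCand nums goal (minAbsDifference_alt nums goal) := by
  unfold pvCand
  have he : minAbsDifference_alt nums goal =
      (pvBuildHalves nums).1.foldl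
        (pvBStep (PySem.List.sorted (pvBuildHalves nums).2 (fun x => x)) goal) |goal| := rfl
  rw [he]
  rcases pvFoldl_cand (pvBStep (PySem.List.sorted (pvBuildHalves nums).2 (fun x => x)) goal)
      (fun l v => ∃ r ∈ (pvBuildHalves nums).2, v = |goal - (l + r)|)
      (fun a x => by
        rcases pvBStep_cand (PySem.List.sorted (pvBuildHalves nums).2 (fun x => x)) goal
            (fun p q hpq hq => PySem.List.sorted_id_getElem_mono (pvBuildHalves nums).2 hpq hq)
            a x with h | ⟨r, hr, hv⟩
        · left; exact h
        · right; exact ⟨r, (PySem.List.mem_sorted _ _ _ _).mp hr, hv⟩)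
      (pvBuildHalves nums).1 |goal| with h | ⟨l, hl, r, hr, hv⟩
  · left; exact h
  · right; exact ⟨l, hl, r, hr, hv⟩

lemma pvB_lb (nums : List Int) (goal : Int) : pvLB nums goal (minAbsDifference_alt nums goal) := by
  unfold pvLB
  have he : minAbsDifference_alt nums goal =
      (pvBuildHalves nums).1.foldl
        (pvBStep (PySem.List.sorted (pvBuildHalves nums).2 (fun x => x)) goal) |goal| := rfl
  rw [he]
  constructor
  · exact pvFoldl_le_init _ (fun a x => pvBStep_le _ _ a x) _ _
  · intro l hl r hr
    obtain ⟨b, hb, hbe⟩ := List.mem_iff_getElem.mp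
      ((PySem.List.mem_sorted (pvBuildHalves nums).2 (fun x => x) false r).mpr hr)
    refine pvFoldl_le_of_step _ (fun a x => pvBStep_le _ _ a x)
      (fun x y => ∃ (b : Nat) (hb : b < (PySem.List.sorted (pvBuildHalves nums).2 (fun x => x)).length),
        y = |goal - (x + (PySem.List.sorted (pvBuildHalves nums).2 (fun x => x))[b])|)
      (fun a x y hP => by
        obtain ⟨b, hb, rfl⟩ := hP
        exact pvBStep_bound (PySem.List.sorted (pvBuildHalves nums).2 (fun x => x)) goal
          (fun p q hpq hq => PySem.List.sorted_id_getElem_mono (pvBuildHalves nums).2 hpq hq)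
          a x b hb)
      (pvBuildHalves nums).1 |goal| l hl _ ⟨b, hb, by rw [hbe]⟩

lemma pv_le_of_cand_lb (nums : List Int) (goal u v : Int)
    (hc : pvCand nums goal v) (hl : pvLB nums goal u) : u ≤ v := by
  rcases hc with rfl | ⟨l, hl2, r, hr, rfl⟩
  · exact hl.1
  · exact hl.2 l hl2 r hr

-- ===== VERDICT (by name: the statement is the Claim_ definition above) =====
theorem minAbsDifference_spec : Claim_equal_minAbsDifference := by
  intro nums goal _
  unfold Spec_minAbsDifference
  exact le_antisymm
    (pv_le_of_cand_lb nums goal _ _ (pvB_cand nums goal) (pvA_lb nums goal))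
    (pv_le_of_cand_lb nums goal _ _ (pvA_cand nums goal) (pvB_lb nums goal))
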